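-- pv_equiv track=rewrite | github.com/sudoStacks/retreivr | engine/stack_setup.py | build_compose_command
-- ===== SOURCE A (Python) =====
-- from typing import Any
--
-- PROFILE_MAP = {
--     "enable_arr_stack": "arr",
--     "enable_qbittorrent": "downloader",
--     "enable_vpn": "vpn",
--     "enable_jellyfin": "jellyfin",
--     "enable_bazarr": "subtitles",
--     "enable_readarr": "books",
-- }
--
-- def derive_profiles(stack: dict[str, Any]) -> list[str]:
--     profiles: list[str] = []
--     if any(bool(stack.get(key)) for key in ("enable_radarr", "enable_sonarr", "enable_readarr", "enable_prowlarr", "enable_arr_stack")):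
--         profiles.append("arr")
--     for key, profile in PROFILE_MAP.items():
--         if profile == "arr":
--             continue
--         if bool(stack.get(key)) and profile not in profiles:
--             profiles.append(profile)
--     if bool(stack.get("enable_hostctl")) and "hostctl" not in profiles:
--         profiles.append("hostctl")
--     return profiles
--
-- def build_compose_command(stack: dict[str, Any]) -> str:
--     profiles = derive_profiles(stack)
--     profile_flags = " ".join(f"--profile {profile}" for profile in profiles)
--     parts = ["docker compose"]
--     if profile_flags:
--         parts.append(profile_flags)
--     parts.append("up -d")
--     return " ".join(parts)
-- ===== SOURCE B (Python) =====
-- PROFILE_TABLE = [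
--     ("arr", ["enable_radarr", "enable_sonarr", "enable_readarr", "enable_prowlarr", "enable_arr_stack"]),
--     ("downloader", ["enable_qbittorrent"]),
--     ("vpn", ["enable_vpn"]),
--     ("jellyfin", ["enable_jellyfin"]),
--     ("subtitles", ["enable_bazarr"]),
--     ("books", ["enable_readarr"]),
--     ("hostctl", ["enable_hostctl"]),
-- ]
--
-- def build_compose_command(stack):
--     profiles = [p for p, keys in PROFILE_TABLE if any(bool(stack.get(k)) for k in keys)]
--     return " ".join(["docker compose"] + ["--profile " + p for p in profiles] + ["up -d"])
-- ===== Notes on version B (the rewrite author's own statement) =====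
-- stated objective: simpler
-- what changed: Replaces the three irregular blocks (special arr any(), PROFILE_MAP loop with continue and dedup guards, hostctl check) plus the two-stage joining with one ordered (profile, keys) table scanned in a single uniform comprehension and one flat join.
import Mathlib
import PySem

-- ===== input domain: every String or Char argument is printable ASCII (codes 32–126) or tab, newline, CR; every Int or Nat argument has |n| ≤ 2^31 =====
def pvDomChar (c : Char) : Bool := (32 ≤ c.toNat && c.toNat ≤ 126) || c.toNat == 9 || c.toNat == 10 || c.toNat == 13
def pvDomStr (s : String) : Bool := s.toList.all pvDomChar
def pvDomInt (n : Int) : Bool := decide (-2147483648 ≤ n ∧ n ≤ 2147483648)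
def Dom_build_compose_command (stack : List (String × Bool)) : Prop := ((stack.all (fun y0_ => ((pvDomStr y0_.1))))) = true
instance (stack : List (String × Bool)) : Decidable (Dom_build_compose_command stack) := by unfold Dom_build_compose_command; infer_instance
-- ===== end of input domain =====

-- B replaces A's three irregular profile blocks and two-stage join with one ordered (profile, keys) table
-- scanned in a single uniform pass and one flat join (objective: simpler).


-- ===== PORT A =====
-- bool(stack.get(key)): first-match lookup in the association list, absent -> falsy -> false
def dgetFlag (stack : List (String × Bool)) (k : String) : Bool :=
  match stack.find? (fun p => p.1 == k) with
  | some p => p.2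
  | none => false

def PROFILE_MAP : List (String × String) :=
  [("enable_arr_stack", "arr"), ("enable_qbittorrent", "downloader"), ("enable_vpn", "vpn"),
   ("enable_jellyfin", "jellyfin"), ("enable_bazarr", "subtitles"), ("enable_readarr", "books")]

-- the body of A's 'for key, profile in PROFILE_MAP.items()' loop (continue = keep profiles)
def derive_step (stack : List (String × Bool)) (profiles : List String) (kp : String × String) : List String :=
  if kp.2 == "arr" then profiles
  else if dgetFlag stack kp.1 && !(profiles.contains kp.2) then profiles ++ [kp.2]
  else profiles

def derive_profiles (stack : List (String × Bool)) : List String :=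
  let profiles : List String := []
  let profiles :=
    if List.any ["enable_radarr", "enable_sonarr", "enable_readarr", "enable_prowlarr", "enable_arr_stack"]
        (fun k => dgetFlag stack k)
    then profiles ++ ["arr"] else profiles
  let profiles := PROFILE_MAP.foldl (derive_step stack) profiles
  if dgetFlag stack "enable_hostctl" && !(profiles.contains "hostctl") then profiles ++ ["hostctl"]
  else profiles

def build_compose_command (stack : List (String × Bool)) : String :=
  let profiles := derive_profiles stack
  let profile_flags := PySem.Str.join " " (profiles.map (fun p => PySem.Str.join "" ["--profile ", p]))
  let parts := ["docker compose"]
  let parts := if profile_flags ≠ "" then parts ++ [profile_flags] else parts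
  let parts := parts ++ ["up -d"]
  PySem.Str.join " " parts

-- ===== PORT B =====
def PROFILE_TABLE : List (String × List String) :=
  [("arr", ["enable_radarr", "enable_sonarr", "enable_readarr", "enable_prowlarr", "enable_arr_stack"]),
   ("downloader", ["enable_qbittorrent"]),
   ("vpn", ["enable_vpn"]),
   ("jellyfin", ["enable_jellyfin"]),
   ("subtitles", ["enable_bazarr"]),
   ("books", ["enable_readarr"]),
   ("hostctl", ["enable_hostctl"])]

def build_compose_command_alt (stack : List (String × Bool)) : String :=
  let profiles := (PROFILE_TABLE.filter (fun pk => pk.2.any (fun k => dgetFlag stack k))).map Prod.fst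
  PySem.Str.join " "
    (["docker compose"] ++ profiles.map (fun p => PySem.Str.join "" ["--profile ", p]) ++ ["up -d"])

-- ===== PRECONDITION & SPEC =====
def Spec_build_compose_command (stack : List (String × Bool)) (out : String) : Prop := out = build_compose_command_alt stack
instance (stack : List (String × Bool)) (out : String) : Decidable (Spec_build_compose_command stack out) := by unfold Spec_build_compose_command; infer_instance

-- ===== CLAIM (what is proved, stated in full; the proofs are below) =====
def Claim_equal_build_compose_command : Prop := ∀ (stack : List (String × Bool)), Dom_build_compose_command stack → Spec_build_compose_command stack (build_compose_command stack)

-- ===== LEMMAS AND PROOFS =====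
-- 'if b then [s] else []': the contribution of one flag to the profiles list
def popt (b : Bool) (s : String) : List String := if b then [s] else []

theorem step_skip (stack : List (String × Bool)) (acc : List String) (kp : String × String)
    (h : (kp.2 == "arr") = true) : derive_step stack acc kp = acc := by
  simp [derive_step, h]

theorem step_add (stack : List (String × Bool)) (acc : List String) (kp : String × String)
    (h : (kp.2 == "arr") = false) (h2 : acc.contains kp.2 = false) :
    derive_step stack acc kp = acc ++ popt (dgetFlag stack kp.1) kp.2 := by
  have h2' : kp.2 ∉ acc := by simpa using h2
  cases hb : dgetFlag stack kp.1 <;> simp [derive_step, h, h2', popt, hb]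

theorem init_popt (b : Bool) :
    (if b then ([] : List String) ++ ["arr"] else []) = popt b "arr" := by
  cases b <;> simp [popt]

theorem guard_add (b : Bool) (acc : List String) (s : String) (h2 : acc.contains s = false) :
    (if b && !(acc.contains s) then acc ++ [s] else acc) = acc ++ popt b s := by
  have h2' : s ∉ acc := by simpa using h2
  cases b <;> simp [popt, h2']

theorem not_mem_popt (b : Bool) (s p : String) (h : p ≠ s) : p ∉ popt b s := by
  cases b <;> simp [popt, h]

theorem cons_to_popt (b : Bool) (s : String) (L : List String) :
    (if b then s :: L else L) = popt b s ++ L := by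
  cases b <;> simp [popt]

theorem profiles_eq (stack : List (String × Bool)) :
    derive_profiles stack =
      (PROFILE_TABLE.filter (fun pk => pk.2.any (fun k => dgetFlag stack k))).map Prod.fst := by
  simp only [derive_profiles, PROFILE_MAP, PROFILE_TABLE, List.foldl_cons, List.foldl_nil,
    List.filter_cons, List.filter_nil, init_popt]
  rw [step_skip _ _ ("enable_arr_stack", "arr") rfl]
  rw [step_add _ _ ("enable_qbittorrent", "downloader") rfl (by simp [not_mem_popt])]
  rw [step_add _ _ ("enable_vpn", "vpn") rfl (by simp [not_mem_popt])]
  rw [step_add _ _ ("enable_jellyfin", "jellyfin") rfl (by simp [not_mem_popt])]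
  rw [step_add _ _ ("enable_bazarr", "subtitles") rfl (by simp [not_mem_popt])]
  rw [step_add _ _ ("enable_readarr", "books") rfl (by simp [not_mem_popt])]
  rw [guard_add _ _ _ (by simp [not_mem_popt])]
  simp only [List.map_cons, List.map_nil, apply_ite (List.map (Prod.fst (β := List String))), cons_to_popt, List.append_assoc, List.append_nil, List.any_cons, List.any_nil, Bool.or_false]

theorem chars_join_append (sep b : List Char) (m : List (List Char)) (h : m ≠ []) :
    PySem.Chars.join sep (m ++ [b]) = PySem.Chars.join sep m ++ sep ++ b := by
  induction m with
  | nil => exact absurd rfl h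
  | cons x xs ih =>
    cases xs with
    | nil => simp [PySem.Chars.join_cons_cons, PySem.Chars.join_singleton]
    | cons y r =>
      rw [List.cons_append, List.cons_append, PySem.Chars.join_cons_cons,
        ← List.cons_append, ih (by simp), PySem.Chars.join_cons_cons]
      simp [List.append_assoc]

theorem chars_join_ne_nil (sep m0 : List Char) (r : List (List Char)) (h : m0 ≠ []) :
    PySem.Chars.join sep (m0 :: r) ≠ [] := by
  cases r with
  | nil => simpa [PySem.Chars.join_singleton] using h
  | cons y t => rw [PySem.Chars.join_cons_cons]; simp [h]

theorem toList_flag (p : String) :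
    (PySem.Str.join "" ["--profile ", p]).toList = "--profile ".toList ++ p.toList := by
  rw [PySem.Str.toList_join]
  simp [PySem.Chars.join_cons_cons, PySem.Chars.join_singleton]

theorem join_shape (l : List String) :
    PySem.Str.join " "
      ((if PySem.Str.join " " (l.map (fun p => PySem.Str.join "" ["--profile ", p])) ≠ "" then
          ["docker compose"] ++ [PySem.Str.join " " (l.map (fun p => PySem.Str.join "" ["--profile ", p]))]
        else ["docker compose"]) ++ ["up -d"]) =
    PySem.Str.join " "
      (["docker compose"] ++ l.map (fun p => PySem.Str.join "" ["--profile ", p]) ++ ["up -d"]) := by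
  cases l with
  | nil =>
    rw [if_neg (by simp; decide)]
    simp
  | cons x xs =>
    have hm0 : (PySem.Str.join "" ["--profile ", x]).toList ≠ [] := by
      rw [toList_flag]; simp
    have hne : PySem.Str.join " " ((x :: xs).map (fun p => PySem.Str.join "" ["--profile ", p])) ≠ "" := by
      intro h
      have h' := congrArg String.toList h
      rw [PySem.Str.toList_join] at h'
      simp only [List.map_cons, List.map_map] at h'
      exact chars_join_ne_nil _ _ _ hm0 h'
    rw [if_pos hne]
    apply String.toList_inj.mp
    simp only [PySem.Str.toList_join, List.map_cons, List.map_append, List.map_nil, List.map_map,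
      List.cons_append, List.nil_append]
    rw [PySem.Chars.join_cons_cons, PySem.Chars.join_cons_cons, PySem.Chars.join_singleton]
    rw [← List.cons_append, ← List.cons_append, chars_join_append _ _ _ (by simp),
      PySem.Chars.join_cons_cons]
    simp [PySem.Chars.join_cons_cons, List.append_assoc]

theorem main_eq (stack : List (String × Bool)) :
    build_compose_command stack = build_compose_command_alt stack := by
  simp only [build_compose_command, build_compose_command_alt, profiles_eq]
  exact join_shape _

-- ===== VERDICT (by name: the statement is the Claim_ definition above) =====
theorem build_compose_command_spec : Claim_equal_build_compose_command := by
  intro stack _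
  exact main_eq stack
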